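-- pv_equiv track=rewrite | github.com/Baahl11/GalaxyParlay | apps/worker/app/ml/smart_parlay.py | _format_market_name
-- ===== SOURCE A (Python) =====
-- def _format_market_name(market_key: str) -> str:
--     """Format market key for user-friendly display"""
--     # Convert snake_case to Title Case
--     parts = market_key.split("_")
--
--     # Special handling for common terms
--     formatted = []
--     for part in parts:
--         if part == "over":
--             formatted.append("Over")
--         elif part == "under":
--             formatted.append("Under")
--         elif part == "home":
--             formatted.append("Home")
--         elif part == "away":
--             formatted.append("Away")
--         elif part == "win":
--             formatted.append("Win")
--         elif part == "draw":
--             formatted.append("Draw")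
--         elif part.replace(".", "").isdigit():
--             formatted.append(part)
--         else:
--             formatted.append(part.title())
--
--     return " ".join(formatted)
-- ===== SOURCE B (Python) =====
-- def _format_market_name(market_key: str) -> str:
--     """Format market key for display: single fused character pass
--     (underscore -> space, title-case letters via a prev-cased flag)."""
--     out = []
--     prev_cased = False
--     for c in market_key:
--         if c == "_":
--             out.append(" ")
--             prev_cased = False
--         elif c.isalpha():
--             out.append(c.lower() if prev_cased else c.upper())
--             prev_cased = True
--         else:
--             out.append(c)
--             prev_cased = False
--     return "".join(out)
-- ===== Notes on version B (the rewrite author's own statement) =====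
-- stated objective: alternative
-- what changed: Replaces A's split-on-underscore / per-part if-elif branch loop / join pipeline with a single fused character-level pass that maps '_' to ' ' and title-cases letters in place using a previous-char-was-cased flag, so no word list is ever built; the literal-word branches and the digit-keep branch of A are subsumed by the per-character casing rule.
import Mathlib
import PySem

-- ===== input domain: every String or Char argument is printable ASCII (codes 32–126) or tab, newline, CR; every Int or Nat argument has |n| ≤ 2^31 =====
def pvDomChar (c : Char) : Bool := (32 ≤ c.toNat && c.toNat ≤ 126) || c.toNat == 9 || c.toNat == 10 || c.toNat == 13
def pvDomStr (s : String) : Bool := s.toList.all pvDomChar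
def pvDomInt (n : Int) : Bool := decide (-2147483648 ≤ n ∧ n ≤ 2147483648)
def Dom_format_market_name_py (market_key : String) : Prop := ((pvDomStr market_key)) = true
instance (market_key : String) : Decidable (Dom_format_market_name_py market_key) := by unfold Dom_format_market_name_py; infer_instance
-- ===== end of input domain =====

-- B replaces A's split/branch-loop/join with one fused character pass (underscore->space, in-place title casing); alternative decomposition, same cost.


-- ===== PORT A =====
-- Hand port of Python str.title(): a letter following a cased character (= an ASCII letter on
-- this domain) is lowercased, a letter following an uncased character is uppercased; exact on ASCII.
def titleChars : List Char → Bool → List Char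
  | [], _ => []
  | c :: cs, prev =>
    (if PySem.Chars.isalpha c then
       (if prev then PySem.Chars.lowerChar c else PySem.Chars.upperChar c)
     else c) :: titleChars cs (PySem.Chars.isalpha c)

def titleStr (s : String) : String := String.ofList (titleChars s.toList false)

-- the body of A's for-loop: the if/elif chain producing the element appended for one part
def partBranch (part : String) : String :=
  if part == "over" then "Over"
  else if part == "under" then "Under"
  else if part == "home" then "Home"
  else if part == "away" then "Away"
  else if part == "win" then "Win"
  else if part == "draw" then "Draw"
  else if PySem.Str.strIsdigit (PySem.Str.replace part "." "") then part
  else titleStr part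

def format_market_name_py (market_key : String) : String :=
  -- parts = market_key.split("_")  (the separator "_" is nonempty, so split? is always `some`)
  let parts := (PySem.Str.split? market_key "_").getD []
  -- for part in parts: formatted.append(<if/elif chain>)
  let formatted := parts.foldl (fun acc part => acc ++ [partBranch part]) []
  PySem.Str.join " " formatted

-- ===== PORT B =====
-- B's single fused pass: the loop body's three branches, with prev_cased threaded as the Bool state.
def altGo : List Char → Bool → List Char
  | [], _ => []
  | c :: cs, prev_cased =>
    if c == '_' then ' ' :: altGo cs false
    else if PySem.Chars.isalpha c then
      (if prev_cased then PySem.Chars.lowerChar c else PySem.Chars.upperChar c) :: altGo cs true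
    else c :: altGo cs false

def format_market_name_py_alt (market_key : String) : String :=
  String.ofList (altGo market_key.toList false)

-- ===== PRECONDITION & SPEC =====
def Spec_format_market_name_py (market_key : String) (out : String) : Prop := out = format_market_name_py_alt market_key
instance (market_key : String) (out : String) : Decidable (Spec_format_market_name_py market_key out) := by unfold Spec_format_market_name_py; infer_instance

-- ===== CLAIM (what is proved, stated in full; the proofs are below) =====
def Claim_equal_format_market_name_py : Prop := ∀ (market_key : String), Dom_format_market_name_py market_key → Spec_format_market_name_py market_key (format_market_name_py market_key)

-- ===== LEMMAS AND PROOFS =====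

theorem pv_foldl_app {α β : Type} (f : α → β) (l : List α) (init : List β) :
    l.foldl (fun a p => a ++ [f p]) init = init ++ l.map f := by
  induction l generalizing init with
  | nil => simp
  | cons x xs ih => simp [List.foldl, ih]

theorem pv_replace_go (a : Char) (new : List Char) :
    ∀ (l acc : List Char) (fuel : ℕ), l.length ≤ fuel →
      PySem.Chars.replace.go [a] new fuel l acc
        = acc.reverse ++ l.flatMap (fun c => if c == a then new else [c]) := by
  intro l
  induction l with
  | nil =>
    intro acc fuel _
    cases fuel <;> simp [PySem.Chars.replace.go]
  | cons c t ih =>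
    intro acc fuel hf
    cases fuel with
    | zero => simp at hf
    | succ fuel =>
      by_cases hc : c = a
      · subst hc
        simp only [PySem.Chars.replace.go, List.isPrefixOf, beq_self_eq_true, Bool.true_and,
          if_true, List.length_cons, List.drop_succ_cons,
          List.length_nil, List.drop_zero]
        rw [ih (new.reverse ++ acc) fuel (by simp only [List.length_cons] at hf; omega)]
        simp
      · have hpre : ([a].isPrefixOf (c :: t)) = false := by
          simp [List.isPrefixOf]
          exact fun h => absurd h.symm hc
        simp only [PySem.Chars.replace.go, hpre, Bool.false_eq_true]
        rw [ih (c :: acc) fuel (by simpa using hf)]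
        simp [hc]

theorem pv_replace_single (a : Char) (new l : List Char) :
    PySem.Chars.replace l [a] new = l.flatMap (fun c => if c == a then new else [c]) := by
  simp [PySem.Chars.replace, pv_replace_go a new l [] l.length (le_refl _)]

theorem pv_splitOn_go (a : Char) :
    ∀ (l cur : List Char) (acc : List (List Char)) (fuel : ℕ), l.length ≤ fuel →
      PySem.Chars.splitOn.go [a] fuel l cur acc
        = acc.reverse ++ List.modifyHead (cur.reverse ++ ·) (List.splitOnP (fun x => x == a) l) := by
  intro l
  induction l with
  | nil =>
    intro cur acc fuel _
    cases fuel <;> simp [PySem.Chars.splitOn.go, List.splitOnP_nil]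
  | cons c t ih =>
    intro cur acc fuel hf
    cases fuel with
    | zero => simp at hf
    | succ fuel =>
      by_cases hc : c = a
      · subst hc
        simp only [PySem.Chars.splitOn.go, List.isPrefixOf, beq_self_eq_true, Bool.true_and,
          if_true, List.length_cons, List.drop_succ_cons,
          List.length_nil, List.drop_zero]
        rw [ih [] (cur.reverse :: acc) fuel (by simp only [List.length_cons] at hf; omega)]
        cases h : List.splitOnP (fun x => x == c) t with
        | nil => exact absurd h (List.splitOnP_ne_nil _ _)
        | cons p ps => simp [List.splitOnP_cons, h]
      · have hpre : ([a].isPrefixOf (c :: t)) = false := by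
          simp [List.isPrefixOf]
          exact fun h => absurd h.symm hc
        simp only [PySem.Chars.splitOn.go, hpre, Bool.false_eq_true]
        rw [ih (c :: cur) acc fuel (by simpa using hf)]
        have hxc : (c == a) = false := by simp [hc]
        rw [List.splitOnP_cons, hxc]
        simp only [Bool.false_eq_true, ite_false]
        cases h : List.splitOnP (fun x => x == a) t with
        | nil => exact absurd h (List.splitOnP_ne_nil _ _)
        | cons p ps => simp

theorem pv_splitOn_single (a : Char) (l : List Char) :
    PySem.Chars.splitOn l [a] = List.splitOnP (fun x => x == a) l := by
  rw [PySem.Chars.splitOn, pv_splitOn_go a l [] [] (l.length + 1) (by omega)]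
  cases h : List.splitOnP (fun x => x == a) l with
  | nil => exact absurd h (List.splitOnP_ne_nil _ _)
  | cons p ps => simp

def pvSub (c : Char) : Char := if c == '_' then ' ' else c

def pvJoinTitle : Bool → List (List Char) → List Char
  | _, [] => []
  | b, p :: ps => titleChars p b ++ ps.flatMap (fun q => ' ' :: titleChars q false)

-- B's fused pass computes title() of the underscore-substituted characters
theorem pv_altGo_eq_title :
    ∀ (cs : List Char) (b : Bool), altGo cs b = titleChars (cs.map pvSub) b := by
  intro cs
  induction cs with
  | nil => intro b; rfl
  | cons c t ih =>
    intro b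
    by_cases hc : c = '_'
    · subst hc
      have hsub : pvSub '_' = ' ' := by decide
      simp [altGo, titleChars, hsub, show PySem.Chars.isalpha ' ' = false from by decide, ih]
    · have hsub : pvSub c = c := by simp [pvSub, hc]
      by_cases ha : PySem.Chars.isalpha c = true
      · simp [altGo, titleChars, hc, hsub, ha, ih]
      · simp only [Bool.not_eq_true] at ha
        simp [altGo, titleChars, hc, hsub, ha, ih]

theorem pv_title_map_sub :
    ∀ (cs : List Char) (b : Bool),
      titleChars (cs.map pvSub) b = pvJoinTitle b (List.splitOnP (fun x => x == '_') cs) := by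
  intro cs
  induction cs with
  | nil => intro b; simp [List.splitOnP_nil, pvJoinTitle, titleChars]
  | cons c t ih =>
    intro b
    by_cases hc : c = '_'
    · subst hc
      have hsub : pvSub '_' = ' ' := by decide
      rw [List.map_cons, hsub, List.splitOnP_cons]
      simp only [beq_self_eq_true, if_true]
      have h1 : titleChars (' ' :: t.map pvSub) b = ' ' :: titleChars (t.map pvSub) false := by
        simp [titleChars, show PySem.Chars.isalpha ' ' = false from by decide]
      rw [h1, ih false]
      cases h : List.splitOnP (fun x => x == '_') t with
      | nil => exact absurd h (List.splitOnP_ne_nil _ _)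
      | cons p ps => simp [pvJoinTitle, titleChars]
    · have hsub : pvSub c = c := by simp [pvSub, hc]
      rw [List.map_cons, hsub, List.splitOnP_cons]
      have hxc : (c == '_') = false := by simp [hc]
      rw [hxc]
      simp only [Bool.false_eq_true, ite_false]
      cases h : List.splitOnP (fun x => x == '_') t with
      | nil => exact absurd h (List.splitOnP_ne_nil _ _)
      | cons p ps =>
        simp only [List.modifyHead]
        rw [show titleChars (c :: t.map pvSub) b
              = (if PySem.Chars.isalpha c then
                   (if b then PySem.Chars.lowerChar c else PySem.Chars.upperChar c)
                 else c) :: titleChars (t.map pvSub) (PySem.Chars.isalpha c) from rfl]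
        rw [ih (PySem.Chars.isalpha c), h]
        simp [pvJoinTitle, titleChars]

theorem pv_join_cons (f : List Char → List Char) (p : List Char) :
    ∀ ps : List (List Char),
      PySem.Chars.join [' '] ((p :: ps).map f)
        = f p ++ ps.flatMap (fun q => ' ' :: f q) := by
  intro ps
  induction ps generalizing p with
  | nil => simp [PySem.Chars.join, List.intercalate]
  | cons q ps ih =>
    have step : List.intercalate [' '] (f p :: f q :: ps.map f)
        = f p ++ [' '] ++ List.intercalate [' '] (f q :: ps.map f) := by
      simp [List.intercalate, List.intersperse]
    simp only [PySem.Chars.join, List.map_cons] at ih ⊢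
    rw [step]
    rw [ih q]
    simp

theorem pv_no_alpha_title (l : List Char) (b : Bool)
    (h : ∀ c ∈ l, PySem.Chars.isalpha c = false) : titleChars l b = l := by
  induction l generalizing b with
  | nil => rfl
  | cons c t ih =>
    have hc := h c (by simp)
    have ht : titleChars t false = t :=
      ih false (fun x hx => h x (by simp [hx]))
    simp [titleChars, hc, ht]

theorem pv_isdigit_not_alpha (c : Char) (h : PySem.Chars.isdigit c = true) :
    PySem.Chars.isalpha c = false := by
  simp only [PySem.Chars.isdigit, Bool.and_eq_true, decide_eq_true_eq] at h
  simp only [PySem.Chars.isalpha, PySem.Chars.isupper, PySem.Chars.islower, Bool.or_eq_false_iff,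
    Bool.and_eq_false_iff, decide_eq_false_iff_not, not_le]
  constructor
  · left
    calc c ≤ '9' := h.2
      _ < 'A' := by decide
  · left
    calc c ≤ '9' := h.2
      _ < 'a' := by decide

theorem pv_partBranch (p : String) : partBranch p = titleStr p := by
  unfold partBranch
  split_ifs with h1 h2 h3 h4 h5 h6 h7
  · rw [eq_of_beq h1]; decide
  · rw [eq_of_beq h2]; decide
  · rw [eq_of_beq h3]; decide
  · rw [eq_of_beq h4]; decide
  · rw [eq_of_beq h5]; decide
  · rw [eq_of_beq h6]; decide
  · -- digit/dot part: no cased character, so title() leaves it unchanged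
    have hrep : (PySem.Str.replace p "." "").toList
        = p.toList.flatMap (fun c => if c == '.' then [] else [c]) := by
      rw [PySem.Str.toList_replace]
      have h1 : (".".toList : List Char) = ['.'] := by decide
      have h2 : ("".toList : List Char) = [] := by decide
      rw [h1, h2, pv_replace_single]
    rw [PySem.Str.strIsdigit_eq, hrep] at h7
    simp only [PySem.Chars.strIsdigit, Bool.and_eq_true, List.all_eq_true] at h7
    have hall : ∀ c ∈ p.toList, PySem.Chars.isalpha c = false := by
      intro c hcmem
      by_cases hdot : c = '.'
      · subst hdot; decide
      · refine pv_isdigit_not_alpha c (h7.2 c ?_)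
        simp only [List.mem_flatMap]
        exact ⟨c, hcmem, by simp [hdot]⟩
    rw [titleStr, pv_no_alpha_title _ _ hall, String.ofList_toList]
  · rfl

-- ===== VERDICT (by name: the statement is the Claim_ definition above) =====
theorem format_market_name_py_spec : Claim_equal_format_market_name_py := by
  intro mk _
  show format_market_name_py mk = format_market_name_py_alt mk
  have hA : format_market_name_py mk
      = PySem.Str.join " "
          (((PySem.Str.split? mk "_").getD []).foldl (fun acc part => acc ++ [partBranch part]) []) :=
    rfl
  rw [hA]
  unfold format_market_name_py_alt
  have hsep : (("_" : String).toList) = ['_'] := by decide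
  -- reduce A's side to Chars level
  have hsplit : (PySem.Str.split? mk "_").getD []
      = (List.splitOnP (fun x => x == '_') mk.toList).map String.ofList := by
    rw [PySem.Str.split?, PySem.Chars.split?, hsep]
    simp [pv_splitOn_single]
  rw [hsplit, pv_foldl_app]
  rw [List.nil_append, List.map_map]
  have hmap : ((List.splitOnP (fun x => x == '_') mk.toList).map (partBranch ∘ String.ofList))
      = (List.splitOnP (fun x => x == '_') mk.toList).map
          (fun q => String.ofList (titleChars q false)) := by
    apply List.map_congr_left
    intro q _
    simp only [Function.comp, pv_partBranch, titleStr, String.toList_ofList]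
  rw [hmap]
  -- reduce B's side: fused pass = title of substituted chars = joined titled parts
  rw [pv_altGo_eq_title, pv_title_map_sub]
  -- both sides are ofList of the same char list
  rw [PySem.Str.join]
  have hsp2 : ((" " : String).toList) = [' '] := by decide
  rw [hsp2, List.map_map]
  have htl : (List.splitOnP (fun x => x == '_') mk.toList).map
        (String.toList ∘ fun q => String.ofList (titleChars q false))
      = (List.splitOnP (fun x => x == '_') mk.toList).map (fun q => titleChars q false) := by
    apply List.map_congr_left
    intro q _
    simp [Function.comp]
  rw [htl]
  cases h : List.splitOnP (fun x => x == '_') mk.toList with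
  | nil => exact absurd h (List.splitOnP_ne_nil _ _)
  | cons p ps =>
    rw [show (p :: ps).map (fun q => titleChars q false)
          = ((fun q => titleChars q false) p) :: ps.map (fun q => titleChars q false) from rfl]
    rw [show ((fun q => titleChars q false) p) :: ps.map (fun q => titleChars q false)
          = (p :: ps).map (fun q => titleChars q false) from rfl]
    rw [pv_join_cons (fun q => titleChars q false) p ps]
    rfl
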